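-- pv_equiv track=rewrite | github.com/rodrivaldivia/TPP | varianceDistributionProfiler.py | dictionary_to_arrays
-- ===== SOURCE A (Python) =====
-- def dictionary_to_arrays(ocurrencies_dict):
-- 	keys = ocurrencies_dict.keys()
-- 	elements = []
-- 	for key in keys:
-- 		elements.append((key, ocurrencies_dict[key]))
-- 	sorted_elements = sorted(elements, key=lambda x: x[0])
-- 	keys = []
-- 	values = []
-- 	for element in sorted_elements:
-- 		keys.append(element[0])
-- 		values.append(element[1])
-- 	return keys, values
-- ===== SOURCE B (Python) =====
-- def _merge(ka, va, kb, vb):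
--     keys, values = [], []
--     i = j = 0
--     la, lb = len(ka), len(kb)
--     while i < la and j < lb:
--         if kb[j] < ka[i]:
--             keys.append(kb[j]); values.append(vb[j]); j += 1
--         else:
--             keys.append(ka[i]); values.append(va[i]); i += 1
--     keys.extend(ka[i:]); values.extend(va[i:])
--     keys.extend(kb[j:]); values.extend(vb[j:])
--     return keys, values
--
--
-- def _msort(keys, values):
--     n = len(keys)
--     if n <= 1:
--         return keys, values
--     m = n // 2
--     ka, va = _msort(keys[:m], values[:m])
--     kb, vb = _msort(keys[m:], values[m:])
--     return _merge(ka, va, kb, vb)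
--
--
-- def dictionary_to_arrays(ocurrencies_dict):
--     return _msort(list(ocurrencies_dict.keys()), list(ocurrencies_dict.values()))
-- ===== Notes on version B (the rewrite author's own statement) =====
-- stated objective: alternative
-- what changed: Instead of calling sorted() on a built list of (key,value) tuples and unzipping it in a second loop, B runs a hand-written top-down merge sort directly on the two parallel key/value arrays (recursive split, iterative merge), never forming tuples; correct because keys are unique, so the stable sorted order is the unique key-increasing arrangement.
import Mathlib
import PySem

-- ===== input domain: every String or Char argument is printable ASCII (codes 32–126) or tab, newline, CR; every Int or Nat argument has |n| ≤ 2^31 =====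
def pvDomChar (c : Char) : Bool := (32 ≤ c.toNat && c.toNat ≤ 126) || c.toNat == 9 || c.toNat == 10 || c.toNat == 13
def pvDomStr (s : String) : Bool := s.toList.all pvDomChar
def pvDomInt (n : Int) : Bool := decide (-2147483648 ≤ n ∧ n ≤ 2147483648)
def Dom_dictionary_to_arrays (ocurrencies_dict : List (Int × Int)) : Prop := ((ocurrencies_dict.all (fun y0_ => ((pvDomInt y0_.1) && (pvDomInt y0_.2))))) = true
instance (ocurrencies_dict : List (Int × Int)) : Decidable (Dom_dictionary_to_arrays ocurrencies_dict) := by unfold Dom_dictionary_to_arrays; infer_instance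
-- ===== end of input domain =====

-- B replaces 'build (key,value) tuples, sorted(), unzip' by a hand-written top-down merge
-- sort on the two parallel key/value arrays (alternative algorithm, similar cost).

-- ===== PORT A =====
def dictionary_to_arrays (ocurrencies_dict : List (Int × Int)) : List Int × List Int :=
  let d := PySem.Dict.ofList ocurrencies_dict
  let keys := d.keys
  let elements := keys.foldl (fun acc key => acc ++ [(key, d.getD key 0)]) []
  let sorted_elements := PySem.List.sorted elements (fun x => x.1) false
  let out := sorted_elements.foldl
    (fun (acc : List Int × List Int) element => (acc.1 ++ [element.1], acc.2 ++ [element.2])) ([], [])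
  out

-- ===== PORT B =====
-- _merge's index-based while loop, transcribed as the obvious structural recursion on the
-- four lists (advancing an index = consuming a head); the trailing extends are the base case.
def pvMerge : List Int → List Int → List Int → List Int → List Int × List Int
  | k1 :: ka, v1 :: va, k2 :: kb, v2 :: vb =>
      if k2 < k1 then
        let r := pvMerge (k1 :: ka) (v1 :: va) kb vb
        (k2 :: r.1, v2 :: r.2)
      else
        let r := pvMerge ka va (k2 :: kb) (v2 :: vb)
        (k1 :: r.1, v1 :: r.2)
  | ka, va, kb, vb => (ka ++ kb, va ++ vb)
termination_by ka _ kb _ => ka.length + kb.length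

-- _msort: recursive split in halves (keys[:m]/keys[m:] on a nonnegative bound = take/drop), then merge.
def pvMsort (keys values : List Int) : List Int × List Int :=
  let n := keys.length
  if n ≤ 1 then (keys, values)
  else
    let m := n / 2
    let l := pvMsort (keys.take m) (values.take m)
    let r := pvMsort (keys.drop m) (values.drop m)
    pvMerge l.1 l.2 r.1 r.2
termination_by keys.length
decreasing_by
  all_goals simp only [List.length_take, List.length_drop]; omega

def dictionary_to_arrays_alt (ocurrencies_dict : List (Int × Int)) : List Int × List Int :=
  let d := PySem.Dict.ofList ocurrencies_dict
  pvMsort d.keys d.values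

-- ===== PRECONDITION & SPEC =====
def Spec_dictionary_to_arrays (ocurrencies_dict : List (Int × Int)) (out : List Int × List Int) : Prop := out = dictionary_to_arrays_alt ocurrencies_dict
instance (ocurrencies_dict : List (Int × Int)) (out : List Int × List Int) : Decidable (Spec_dictionary_to_arrays ocurrencies_dict out) := by unfold Spec_dictionary_to_arrays; infer_instance

-- ===== CLAIM (what is proved, stated in full; the proofs are below) =====
def Claim_equal_dictionary_to_arrays : Prop := ∀ (ocurrencies_dict : List (Int × Int)), Dom_dictionary_to_arrays ocurrencies_dict → Spec_dictionary_to_arrays ocurrencies_dict (dictionary_to_arrays ocurrencies_dict)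

-- ===== LEMMAS AND PROOFS =====

lemma foldl_pairs (l : List Int) (f : Int → Int) (a : List (Int × Int)) :
    l.foldl (fun acc k => acc ++ [(k, f k)]) a = a ++ l.map (fun k => (k, f k)) := by
  induction l generalizing a with
  | nil => simp
  | cons x t ih => simp [ih]

lemma foldl_unzip (l : List (Int × Int)) (a b : List Int) :
    l.foldl (fun (acc : List Int × List Int) e => (acc.1 ++ [e.1], acc.2 ++ [e.2])) (a, b)
      = (a ++ l.map Prod.fst, b ++ l.map Prod.snd) := by
  induction l generalizing a b with
  | nil => simp
  | cons x t ih => simp [ih]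

/-- pvMerge on the projections of two key-sorted pair lists produces the projections of a
    key-sorted interleaving of the two. -/
lemma pvMerge_spec (a b : List (Int × Int))
    (ha : a.Pairwise (fun x y => x.1 ≤ y.1)) (hb : b.Pairwise (fun x y => x.1 ≤ y.1)) :
    ∃ q : List (Int × Int), q.Perm (a ++ b) ∧ q.Pairwise (fun x y => x.1 ≤ y.1) ∧
      pvMerge (a.map Prod.fst) (a.map Prod.snd) (b.map Prod.fst) (b.map Prod.snd)
        = (q.map Prod.fst, q.map Prod.snd) := by
  induction a generalizing b with
  | nil =>
    exact ⟨b, by simp, hb, by simp [pvMerge]⟩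
  | cons x a' iha =>
    induction b with
    | nil =>
      exact ⟨x :: a', by simp, ha, by simp [pvMerge]⟩
    | cons y b' ihb =>
      rcases List.pairwise_cons.mp ha with ⟨hxa, ha'⟩
      rcases List.pairwise_cons.mp hb with ⟨hyb, hb'⟩
      by_cases h : y.1 < x.1
      · obtain ⟨q', hperm, hpw, heq⟩ := ihb hb'
        refine ⟨y :: q', ?_, ?_, ?_⟩
        · exact (hperm.cons y).trans List.perm_middle.symm
        · refine List.pairwise_cons.mpr ⟨?_, hpw⟩
          intro z hz
          have hz' : z ∈ (x :: a') ++ b' := hperm.mem_iff.mp hz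
          rcases List.mem_append.mp hz' with hz'' | hz''
          · rcases List.mem_cons.mp hz'' with rfl | hz3
            · exact le_of_lt h
            · exact (le_of_lt h).trans (hxa z hz3)
          · exact hyb z hz''
        · simp only [List.map_cons] at heq
          simp only [List.map_cons, pvMerge, if_pos h, heq]
      · obtain ⟨q', hperm, hpw, heq⟩ := iha (y :: b') ha' (List.pairwise_cons.mpr ⟨hyb, hb'⟩)
        refine ⟨x :: q', ?_, ?_, ?_⟩
        · simpa using hperm.cons x
        · refine List.pairwise_cons.mpr ⟨?_, hpw⟩
          intro z hz
          have hz' : z ∈ a' ++ y :: b' := hperm.mem_iff.mp hz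
          have hxy : x.1 ≤ y.1 := le_of_not_gt h
          rcases List.mem_append.mp hz' with hz'' | hz''
          · exact hxa z hz''
          · rcases List.mem_cons.mp hz'' with rfl | hz3
            · exact hxy
            · exact hxy.trans (hyb z hz3)
        · simp only [List.map_cons] at heq
          simp only [List.map_cons, pvMerge, if_neg h, heq]

/-- pvMsort on the projections of a pair list returns the projections of some key-sorted
    permutation of it. -/
lemma pvMsort_spec (ps : List (Int × Int)) :
    ∃ q : List (Int × Int), q.Perm ps ∧ q.Pairwise (fun x y => x.1 ≤ y.1) ∧
      pvMsort (ps.map Prod.fst) (ps.map Prod.snd) = (q.map Prod.fst, q.map Prod.snd) := by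
  induction hn : ps.length using Nat.strong_induction_on generalizing ps with
  | _ n ih =>
  by_cases hle : ps.length ≤ 1
  · refine ⟨ps, List.Perm.refl ps, ?_, ?_⟩
    · match ps, hle with
      | [], _ => exact List.Pairwise.nil
      | [p], _ => simp
    · rw [pvMsort]
      simp [hle]
  · rw [pvMsort]
    simp only [List.length_map, if_neg hle]
    set m := ps.length / 2 with hm
    obtain ⟨ql, hpl, hwl, hel⟩ := ih (ps.take m).length (by simp; omega) (ps.take m) rfl
    obtain ⟨qr, hpr, hwr, her⟩ := ih (ps.drop m).length (by simp; omega) (ps.drop m) rfl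
    obtain ⟨q, hp, hw, he⟩ := pvMerge_spec ql qr hwl hwr
    refine ⟨q, ?_, hw, ?_⟩
    · exact hp.trans ((hpl.append hpr).trans (by rw [List.take_append_drop]))
    · rw [← List.map_take, ← List.map_take, ← List.map_drop, ← List.map_drop, hel, her]
      exact he

-- ===== VERDICT (by name: the statement is the Claim_ definition above) =====
theorem dictionary_to_arrays_spec : Claim_equal_dictionary_to_arrays := by
  intro l _
  unfold Spec_dictionary_to_arrays dictionary_to_arrays dictionary_to_arrays_alt
  set d := PySem.Dict.ofList l with hd
  have hk : d.keys.Nodup := PySem.Dict.nodup_keys_ofList l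
  have hkeys : d.keys = d.items.map Prod.fst := by simp only [PySem.Dict.keys]
  have hvals : d.values = d.items.map Prod.snd := by simp only [PySem.Dict.values]
  have helems : d.keys.foldl (fun acc key => acc ++ [(key, d.getD key 0)]) [] = d.items := by
    rw [foldl_pairs, List.nil_append, ← PySem.Dict.items_eq_map_keys d hk 0]
  obtain ⟨q, hperm, hpw, heq⟩ := pvMsort_spec d.items
  have hnd : (q.map Prod.fst).Nodup := by
    exact ((hperm.map Prod.fst).nodup_iff).mpr (hkeys ▸ hk)
  have hlt : q.Pairwise (fun a b => a.1 < b.1) := by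
    have hne : q.Pairwise (fun a b => a.1 ≠ b.1) := List.pairwise_map.mp hnd
    exact (hpw.and hne).imp fun h => lt_of_le_of_ne h.1 h.2
  have hsorted : PySem.List.sorted d.items (fun x => x.1) false = q :=
    PySem.List.sorted_eq_of_perm_of_pairwise_lt _ _ _ hperm hlt
  simp only [helems, hsorted, foldl_unzip, List.nil_append]
  rw [hkeys, hvals, heq]
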